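-- pv_equiv track=rewrite | github.com/kazzyabe/Chinese_Abbreviation_CRF | abbreviate_crf.py | seg2dict
-- ===== SOURCE A (Python) =====
-- def seg2dict(segmented):
--     seg_ind = {}
--     for i in range(len(segmented)):
--         if i==0:
--             seg_ind[i] = {'ini': 0,'end':len(segmented[i][0])}
--         else:
--             ini = seg_ind[i-1]['end']
--             seg_ind[i] = {'ini':ini,'end':ini+len(segmented[i][0])}
--     return seg_ind
-- ===== SOURCE B (Python) =====
-- def seg2dict(segmented):
--     # Closed-form per-index offsets: no running accumulator, each entry is an
--     # independent prefix sum of the segment lengths.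
--     lens = [len(seg[0]) for seg in segmented]
--     return {i: {'ini': sum(lens[:i]), 'end': sum(lens[:i + 1])}
--             for i in range(len(lens))}
-- ===== Notes on version B (the rewrite author's own statement) =====
-- stated objective: alternative
-- what changed: Replaces A's sequential dict build with a running offset read back from the dict under construction by a closed-form per-index formula: each entry i is computed independently as the prefix sums sum(lens[:i]) / sum(lens[:i+1]), with no accumulator and no dependence on previously built entries.
import Mathlib
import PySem

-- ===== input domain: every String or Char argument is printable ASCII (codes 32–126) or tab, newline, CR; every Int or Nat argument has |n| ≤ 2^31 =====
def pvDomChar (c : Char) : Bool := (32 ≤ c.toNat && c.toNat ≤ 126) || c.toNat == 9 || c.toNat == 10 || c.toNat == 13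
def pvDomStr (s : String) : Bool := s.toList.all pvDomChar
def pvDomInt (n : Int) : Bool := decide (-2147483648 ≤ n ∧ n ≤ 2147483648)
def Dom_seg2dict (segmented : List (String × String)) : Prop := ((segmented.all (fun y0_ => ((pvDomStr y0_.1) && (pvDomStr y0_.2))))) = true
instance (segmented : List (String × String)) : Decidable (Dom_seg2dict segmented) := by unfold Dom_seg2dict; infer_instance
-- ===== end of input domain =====

-- B replaces A's sequential dict build (running offset read back from the dict) with independent closed-form prefix sums per index (alternative decomposition, quadratic); return values proved equal on all inputs.


-- ===== PORT A =====
-- one loop iteration of A; the dict lookups seg_ind[i-1]['end'] never miss (keys 0..i-1 are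
-- always present), so '.getD' defaults are unreachable
def seg2dictStep (segmented : List (String × String))
    (seg_ind : PySem.Dict Int (PySem.Dict String Int)) (i : Int) :
    PySem.Dict Int (PySem.Dict String Int) :=
  if i == 0 then
    seg_ind.insert i (PySem.Dict.mk [("ini", 0),
      ("end", PySem.Str.len ((PySem.List.pyGet? segmented i).getD ("", "")).1)])
  else
    let ini := ((seg_ind.get? (i - 1)).getD PySem.Dict.empty).getD "end" 0
    seg_ind.insert i (PySem.Dict.mk [("ini", ini),
      ("end", ini + PySem.Str.len ((PySem.List.pyGet? segmented i).getD ("", "")).1)])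

def seg2dict (segmented : List (String × String)) : List (Int × List (String × Int)) :=
  let d := (PySem.List.pyRange 0 (PySem.List.len segmented) 1).foldl
      (seg2dictStep segmented) PySem.Dict.empty
  d.items.map (fun p => (p.1, p.2.items))

-- ===== PORT B =====
def seg2dict_alt (segmented : List (String × String)) : List (Int × List (String × Int)) :=
  let lens := segmented.map (fun seg => PySem.Str.len seg.1)
  (PySem.List.pyRange 0 (PySem.List.len lens) 1).map (fun i =>
    (i, [("ini", (PySem.List.slice lens none (some i)).sum),
         ("end", (PySem.List.slice lens none (some (i + 1))).sum)]))

-- ===== PRECONDITION & SPEC =====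
def Spec_seg2dict (segmented : List (String × String)) (out : List (Int × List (String × Int))) : Prop := out = seg2dict_alt segmented
instance (segmented : List (String × String)) (out : List (Int × List (String × Int))) : Decidable (Spec_seg2dict segmented out) := by unfold Spec_seg2dict; infer_instance

-- ===== CLAIM (what is proved, stated in full; the proofs are below) =====
def Claim_equal_seg2dict : Prop := ∀ (segmented : List (String × String)), Dom_seg2dict segmented → Spec_seg2dict segmented (seg2dict segmented)

-- ===== LEMMAS AND PROOFS =====

-- common target: the segment table for lengths `lens`, first index `idx`, running offset `off`
def segSpec : List Int → Int → Int → List (Int × List (String × Int))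
  | [], _, _ => []
  | l :: ls, idx, off => (idx, [("ini", off), ("end", off + l)]) :: segSpec ls (idx + 1) (off + l)

-- the same table with inner dicts, as A's loop state holds it
def itemsA : List Int → Int → Int → List (Int × PySem.Dict String Int)
  | [], _, _ => []
  | l :: ls, idx, off =>
      (idx, PySem.Dict.mk [("ini", off), ("end", off + l)]) :: itemsA ls (idx + 1) (off + l)

-- segSpec as a closed-form indexed map of prefix sums (B's shape)
theorem segSpec_eq_map (lens : List Int) : ∀ (idx off : Int),
    segSpec lens idx off = (List.range lens.length).map (fun (k : Nat) =>
      (idx + (k : Int), [("ini", off + (lens.take k).sum),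
                         ("end", off + (lens.take (k + 1)).sum)])) := by
  induction lens with
  | nil => intro idx off; simp [segSpec]
  | cons l ls ih =>
    intro idx off
    rw [show (l :: ls).length = ls.length + 1 from rfl, List.range_succ_eq_map,
        List.map_cons, List.map_map]
    simp only [segSpec]
    congr 1
    · simp
    · rw [ih (idx + 1) (off + l)]
      apply List.map_congr_left
      intro k _
      simp only [Function.comp_apply, Nat.succ_eq_add_one, List.take_succ_cons, List.sum_cons,
        Prod.mk.injEq, List.cons.injEq, and_true]
      exact ⟨by push_cast; ring, ⟨trivial, by ring⟩, trivial, by ring⟩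

theorem alt_eq_segSpec (segmented : List (String × String)) :
    seg2dict_alt segmented = segSpec (segmented.map (fun seg => PySem.Str.len seg.1)) 0 0 := by
  simp only [seg2dict_alt]
  generalize segmented.map (fun seg => PySem.Str.len seg.1) = lens
  rw [segSpec_eq_map, show PySem.List.len lens = (lens.length : Int) from PySem.List.len_eq lens,
      PySem.List.pyRange_one, List.map_map]
  simp only [Int.sub_zero, Int.toNat_natCast]
  apply List.map_congr_left
  intro k _
  simp only [Function.comp_apply, zero_add]
  rw [PySem.List.slice_to_natCast,
      show ((k : Int) + 1) = ((k + 1 : Nat) : Int) from by push_cast; ring,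
      PySem.List.slice_to_natCast]

-- keys of itemsA lens idx off are exactly idx, idx+1, …, idx+|lens|-1
theorem contains_itemsA_false (lens : List Int) : ∀ (idx off j : Int),
    (idx + lens.length ≤ j ∨ j < idx) →
    (PySem.Dict.mk (itemsA lens idx off)).contains j = false := by
  induction lens with
  | nil => intro idx off j _; simp [itemsA, PySem.Dict.contains_mk]
  | cons l ls ih =>
    intro idx off j hj
    simp only [itemsA, PySem.Dict.contains_mk, List.any_cons]
    have h1 : (idx == j) = false := by
      simp only [List.length_cons] at hj
      rw [beq_eq_false_iff_ne]
      omega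
    rw [h1]
    simp only [Bool.false_or]
    have := ih (idx + 1) (off + l) j (by simp only [List.length_cons] at hj; omega)
    simpa [PySem.Dict.contains_mk] using this

-- looking up the LAST key of itemsA returns the last inner dict
theorem get?_itemsA_last (lens : List Int) (h : lens ≠ []) : ∀ (idx off : Int),
    (PySem.Dict.mk (itemsA lens idx off)).get? (idx + lens.length - 1)
      = some (PySem.Dict.mk [("ini", off + lens.dropLast.sum), ("end", off + lens.sum)]) := by
  induction lens with
  | nil => exact absurd rfl h
  | cons l ls ih =>
    intro idx off
    cases ls with
    | nil => simp [itemsA, PySem.Dict.get?_mk_cons]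
    | cons l' ls' =>
      have key : idx + ((l :: l' :: ls').length : Int) - 1
          = (idx + 1) + ((l' :: ls').length : Int) - 1 := by
        simp only [List.length_cons]; push_cast; ring
      rw [key]
      rw [show itemsA (l :: l' :: ls') idx off
          = (idx, PySem.Dict.mk [("ini", off), ("end", off + l)])
              :: itemsA (l' :: ls') (idx + 1) (off + l) from rfl]
      rw [PySem.Dict.get?_mk_cons,
        if_neg (by simp only [beq_iff_eq, List.length_cons]; push_cast; omega)]
      rw [ih (List.cons_ne_nil _ _) (idx + 1) (off + l)]
      rw [List.dropLast_cons_of_ne_nil (List.cons_ne_nil _ _)]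
      simp only [List.sum_cons, add_assoc]

-- appending one length to itemsA appends one entry
theorem itemsA_append (ls : List Int) : ∀ (l idx off : Int),
    itemsA (ls ++ [l]) idx off
      = itemsA ls idx off ++ [(idx + ls.length,
          PySem.Dict.mk [("ini", off + ls.sum), ("end", off + ls.sum + l)])] := by
  induction ls with
  | nil => intro l idx off; simp [itemsA]
  | cons a as ih =>
    intro l idx off
    simp only [List.cons_append, itemsA, ih, List.length_cons, List.sum_cons]
    push_cast
    ring_nf

-- A's loop invariant: after the first n iterations the dict is itemsA of the first n lengths
theorem loopA (segmented : List (String × String)) (n : Nat) (hn : n ≤ segmented.length) :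
    (PySem.List.pyRange 0 (n : Int) 1).foldl (seg2dictStep segmented) PySem.Dict.empty
      = PySem.Dict.mk (itemsA ((segmented.take n).map (fun seg => PySem.Str.len seg.1)) 0 0) := by
  induction n with
  | zero => rfl
  | succ m ih =>
    have hm : m ≤ segmented.length := Nat.le_of_succ_le hn
    have hrange : PySem.List.pyRange 0 ((m + 1 : Nat) : Int) 1
        = PySem.List.pyRange 0 (m : Int) 1 ++ [(m : Int)] := by
      push_cast
      exact PySem.List.pyRange_one_succ_right (by positivity)
    rw [hrange, List.foldl_append, ih hm]
    have hmem : m < segmented.length := hn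
    obtain ⟨p, hp⟩ : ∃ p, segmented[m]? = some p := ⟨segmented[m], List.getElem?_eq_getElem hmem⟩
    have hget : PySem.List.pyGet? segmented (m : Int) = some p := by
      simpa [PySem.List.pyGet?_natCast] using hp
    have htake : segmented.take (m + 1) = segmented.take m ++ [p] := by
      rw [List.take_add_one, hp]; simp
    cases m with
    | zero =>
      simp only [List.foldl_cons, List.foldl_nil, seg2dictStep]
      simp only [Nat.cast_zero, beq_self_eq_true, if_true]
      rw [htake, show PySem.List.pyGet? segmented 0 = some p from by simpa using hget]
      apply PySem.Dict.ext
      simp [PySem.Dict.items_insert, PySem.Dict.contains_mk, itemsA]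
    | succ k =>
      simp only [List.foldl_cons, List.foldl_nil, seg2dictStep]
      have hne0 : (((k + 1 : Nat) : Int) == 0) = false := by simp; omega
      rw [hne0]; simp only [Bool.false_eq_true, if_false]
      have hlen : ((segmented.take (k + 1)).map (fun seg => PySem.Str.len seg.1)).length = k + 1 := by
        simp [List.length_take, Nat.min_eq_left hm]
      have hlast := get?_itemsA_last ((segmented.take (k + 1)).map (fun seg => PySem.Str.len seg.1))
        (by intro hc; rw [hc] at hlen; simp at hlen) 0 0
      rw [hlen] at hlast
      have hkey : ((k + 1 : Nat) : Int) - 1 = 0 + ((k + 1 : Nat) : Int) - 1 := by ring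
      rw [hkey, hlast]
      simp only [PySem.Dict.getD_eq_get?_getD, Option.getD_some, PySem.Dict.get?_mk_cons]
      rw [show (("ini" : String) == "end") = false from rfl,
          show (("end" : String) == "end") = true from rfl]
      simp only [if_false, if_true, Option.getD_some, hget, Bool.false_eq_true]
      have hfresh : (PySem.Dict.mk (itemsA ((segmented.take (k + 1)).map
            (fun seg => PySem.Str.len seg.1)) 0 0)).contains (((k + 1 : Nat) : Int)) = false :=
        contains_itemsA_false _ 0 0 _ (Or.inl (by rw [hlen]; push_cast; omega))
      apply PySem.Dict.ext
      simp only [PySem.Dict.items_insert, hfresh, Bool.false_eq_true, if_false]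
      rw [htake, List.map_append]
      simp only [List.map_cons, List.map_nil]
      rw [itemsA_append, hlen]
      simp

theorem a_eq_segSpec (segmented : List (String × String)) :
    seg2dict segmented = segSpec (segmented.map (fun seg => PySem.Str.len seg.1)) 0 0 := by
  unfold seg2dict
  rw [show PySem.List.len segmented = (segmented.length : Int) from PySem.List.len_eq segmented,
      loopA segmented segmented.length (le_refl _), List.take_length]
  generalize segmented.map (fun seg => PySem.Str.len seg.1) = lens
  show (PySem.Dict.mk (itemsA lens 0 0)).items.map (fun p => (p.1, p.2.items)) = segSpec lens 0 0
  have : ∀ (ls : List Int) (idx off : Int),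
      (itemsA ls idx off).map (fun p => (p.1, p.2.items)) = segSpec ls idx off := by
    intro ls
    induction ls with
    | nil => intro idx off; simp [itemsA, segSpec]
    | cons a as ih => intro idx off; simp [itemsA, segSpec, ih]
  exact this lens 0 0

-- ===== VERDICT (by name: the statement is the Claim_ definition above) =====
theorem seg2dict_spec : Claim_equal_seg2dict := by
  intro segmented _
  show seg2dict segmented = seg2dict_alt segmented
  rw [a_eq_segSpec, alt_eq_segSpec]
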